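-- pv_equiv track=rewrite | github.com/NshutiElvin/auca | .history/schedules/utils_20250715045205.py | detect_scheduling_conflicts
-- ===== SOURCE A (Python) =====
-- from collections import defaultdict
--
-- def detect_scheduling_conflicts(course_pairs, student_assignments, date_slots):
--     """
--     Detect potential scheduling conflicts for each pair and slot
--     Returns a conflict score for each combination of pair and slot
--     Lower scores are better (fewer conflicts)
--     """
--     num_pairs = len(course_pairs)
--     num_slots = len(date_slots)
--
--     # Initialize conflict matrix
--     conflict_scores = [[0 for _ in range(num_slots)] for _ in range(num_pairs)]
--
--     # Group slots by date
--     slots_by_date = defaultdict(list)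
--     for slot_idx, (date, label, start, end) in enumerate(date_slots):
--         slots_by_date[date].append(slot_idx)
--
--     # Calculate conflicts
--     for student_id, assignments in student_assignments.items():
--         # Check if student has multiple exams on the same day
--         for pair_indices, course_ids in assignments:
--             for pair_idx1, _ in assignments:
--                 if pair_idx1 != pair_indices:
--                     # These two course pairs can't be scheduled on the same day
--                     for date, slot_indices in slots_by_date.items():
--                         for slot_idx1 in slot_indices:
--                             for slot_idx2 in slot_indices:
--                                 conflict_scores[pair_idx1][slot_idx1] += 1
--                                 conflict_scores[pair_indices][slot_idx2] += 1
--
--     return conflict_scores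
-- ===== SOURCE B (Python) =====
-- from collections import Counter
--
-- def detect_scheduling_conflicts(course_pairs, student_assignments, date_slots):
--     """
--     Same conflict matrix as the original, computed in closed form:
--     each cell (pair, slot) equals (row weight) * (number of slots sharing
--     that slot's date), where the row weight sums 2*m*(n-m) over students
--     (m = multiplicity of the pair index among the student's n assignments).
--     """
--     num_pairs = len(course_pairs)
--     num_slots = len(date_slots)
--
--     # weight of a slot = number of slots that share its date
--     date_count = Counter(date for date, _, _, _ in date_slots)
--     slot_weights = [date_count[date] for date, _, _, _ in date_slots]
--
--     # weight of a row (pair index): sum over students of 2*m*(n-m)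
--     row_weights = Counter()
--     for assignments in student_assignments.values():
--         counts = Counter(p for p, _ in assignments)
--         n = len(assignments)
--         for p, m in counts.items():
--             if m != n:
--                 row_weights[p] += 2 * m * (n - m)
--
--     scores = [[0] * num_slots for _ in range(num_pairs)]
--     for p, w in row_weights.items():
--         for s in range(num_slots):
--             scores[p][s] += w * slot_weights[s]
--     return scores
-- ===== Notes on version B (the rewrite author's own statement) =====
-- stated objective: faster
-- what changed: Instead of looping over every ordered pair of a student's assignments and every pair of same-date slots, B computes for each pair index a closed-form row weight (sum over students of 2*m*(n-m) via Counters) and for each slot the size of its date group, and fills each cell as row_weight * slot_weight.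
import Mathlib
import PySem

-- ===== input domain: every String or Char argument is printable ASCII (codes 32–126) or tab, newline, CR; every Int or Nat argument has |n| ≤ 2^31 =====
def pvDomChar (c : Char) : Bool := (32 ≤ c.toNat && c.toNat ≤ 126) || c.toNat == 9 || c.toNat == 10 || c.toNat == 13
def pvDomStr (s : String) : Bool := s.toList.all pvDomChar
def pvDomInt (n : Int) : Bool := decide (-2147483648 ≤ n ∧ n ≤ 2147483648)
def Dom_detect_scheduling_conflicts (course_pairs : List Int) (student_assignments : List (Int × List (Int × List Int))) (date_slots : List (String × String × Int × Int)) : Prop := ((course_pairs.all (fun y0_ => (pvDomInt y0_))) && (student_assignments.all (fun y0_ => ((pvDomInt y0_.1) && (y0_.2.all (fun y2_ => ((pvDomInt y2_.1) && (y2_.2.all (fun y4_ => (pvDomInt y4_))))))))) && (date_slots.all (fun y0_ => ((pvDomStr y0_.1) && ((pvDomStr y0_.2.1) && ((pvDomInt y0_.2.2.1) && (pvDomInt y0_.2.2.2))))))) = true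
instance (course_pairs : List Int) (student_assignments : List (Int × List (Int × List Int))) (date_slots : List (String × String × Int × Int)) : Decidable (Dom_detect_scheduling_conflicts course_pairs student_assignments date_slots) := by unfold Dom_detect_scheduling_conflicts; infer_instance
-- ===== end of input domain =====

-- B replaces A's quadruple nested loop by closed-form per-row and per-slot weights (objective: faster);
-- A = B proved on Pre_ (all inputs where Python A returns normally).


-- ===== PORT A =====
-- Python `M[i][j] += v` on a list-of-lists with Python's negative-index rule;
-- exact for in-range (possibly negative) indices — Python raises IndexError out of range
-- (excluded by Pre_); the Lean helper leaves M unchanged there.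
def pyAdd2 (M : List (List Int)) (i j v : Int) : List (List Int) :=
  let i' := if i < 0 then i + M.length else i
  if 0 ≤ i' ∧ i' < M.length then
    let row := M.getD i'.toNat []
    let j' := if j < 0 then j + row.length else j
    if 0 ≤ j' ∧ j' < row.length then
      M.set i'.toNat (row.set j'.toNat (row.getD j'.toNat 0 + v))
    else M
  else M

def detect_scheduling_conflicts (course_pairs : List Int) (student_assignments : List (Int × List (Int × List Int))) (date_slots : List (String × String × Int × Int)) : List (List Int) :=
  let num_pairs := course_pairs.length
  let num_slots := date_slots.length
  let conflict_scores : List (List Int) :=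
    (List.range num_pairs).map (fun _ => (List.range num_slots).map (fun _ => (0 : Int)))
  let slots_by_date : PySem.Dict String (List Int) :=
    (PySem.List.enumerate date_slots 0).foldl
      (fun d si => d.modify si.2.1 [] (· ++ [si.1])) PySem.Dict.empty
  student_assignments.foldl (fun M st =>
    st.2.foldl (fun M e =>
      st.2.foldl (fun M e1 =>
        if e1.1 ≠ e.1 then
          slots_by_date.items.foldl (fun M dg =>
            dg.2.foldl (fun M s1 =>
              dg.2.foldl (fun M s2 =>
                pyAdd2 (pyAdd2 M e1.1 s1 1) e.1 s2 1) M) M) M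
        else M) M) M) conflict_scores

-- ===== PORT B =====
def detect_scheduling_conflicts_alt (course_pairs : List Int) (student_assignments : List (Int × List (Int × List Int))) (date_slots : List (String × String × Int × Int)) : List (List Int) :=
  let num_pairs := course_pairs.length
  let num_slots := date_slots.length
  let date_count : PySem.Dict String Int := PySem.Dict.counter (date_slots.map (fun s => s.1))
  let slot_weights : List Int := date_slots.map (fun s => date_count.getD s.1 0)
  let row_weights : PySem.Dict Int Int :=
    student_assignments.foldl (fun rw st =>
      let counts : PySem.Dict Int Int := PySem.Dict.counter (st.2.map (fun e => e.1))
      let n : Int := st.2.length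
      counts.items.foldl (fun rw pm =>
        if pm.2 ≠ n then rw.modify pm.1 0 (· + 2 * pm.2 * (n - pm.2)) else rw) rw)
      PySem.Dict.empty
  let scores0 : List (List Int) :=
    (List.range num_pairs).map (fun _ => List.replicate num_slots (0 : Int))
  row_weights.items.foldl (fun M pw =>
    (List.range num_slots).foldl (fun M (s : Nat) =>
      pyAdd2 M pw.1 (s : Int) (pw.2 * slot_weights.getD s 0)) M) scores0

-- ===== PRECONDITION & SPEC =====
-- Pre_ excludes exactly the inputs on which Python A raises IndexError: some date slots exist and
-- a student carries two different pair indices together with an index outside [-num_pairs, num_pairs).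
def Pre_detect_scheduling_conflicts (course_pairs : List Int) (student_assignments : List (Int × List (Int × List Int))) (date_slots : List (String × String × Int × Int)) : Prop :=
  date_slots = [] ∨ ∀ st ∈ student_assignments,
    (∃ x ∈ st.2, ∃ y ∈ st.2, x.1 ≠ y.1) →
    ∀ e ∈ st.2, -(course_pairs.length : Int) ≤ e.1 ∧ e.1 < (course_pairs.length : Int)
instance (course_pairs : List Int) (student_assignments : List (Int × List (Int × List Int))) (date_slots : List (String × String × Int × Int)) : Decidable (Pre_detect_scheduling_conflicts course_pairs student_assignments date_slots) := by unfold Pre_detect_scheduling_conflicts; infer_instance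

def pvWitness_detect_scheduling_conflicts : List Int × (List (Int × List (Int × List Int))) × (List (String × String × Int × Int)) :=
  ([5, 7], [(1, [(0, [5]), (1, [7])])], [("d1", "AM", 1, 2), ("d1", "PM", 3, 4)])

def Spec_detect_scheduling_conflicts (course_pairs : List Int) (student_assignments : List (Int × List (Int × List Int))) (date_slots : List (String × String × Int × Int)) (out : List (List Int)) : Prop := out = detect_scheduling_conflicts_alt course_pairs student_assignments date_slots
instance (course_pairs : List Int) (student_assignments : List (Int × List (Int × List Int))) (date_slots : List (String × String × Int × Int)) (out : List (List Int)) : Decidable (Spec_detect_scheduling_conflicts course_pairs student_assignments date_slots out) := by unfold Spec_detect_scheduling_conflicts; infer_instance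

-- ===== CLAIM (what is proved, stated in full; the proofs are below) =====
def Claim_equal_detect_scheduling_conflicts : Prop := ∀ (course_pairs : List Int) (student_assignments : List (Int × List (Int × List Int))) (date_slots : List (String × String × Int × Int)), Dom_detect_scheduling_conflicts course_pairs student_assignments date_slots → Pre_detect_scheduling_conflicts course_pairs student_assignments date_slots → Spec_detect_scheduling_conflicts course_pairs student_assignments date_slots (detect_scheduling_conflicts course_pairs student_assignments date_slots)

-- ===== LEMMAS AND PROOFS =====

-- matrix shape and cell access
def pvShape (P S : Nat) (M : List (List Int)) : Prop := M.length = P ∧ ∀ r ∈ M, r.length = S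
def pvCell (M : List (List Int)) (a b : Nat) : Int := (M.getD a []).getD b 0
def pvNorm (n : Nat) (i : Int) : Int := if i < 0 then i + n else i
def pvHit (n : Nat) (i : Int) (a : Nat) : Int :=
  if 0 ≤ pvNorm n i ∧ pvNorm n i < n ∧ pvNorm n i = a then 1 else 0

lemma pvHit_eq_of_lt {P a : Nat} (h : a < P) (q : Int) :
    pvHit P q a = if q = (a : Int) ∨ q = (a : Int) - P then 1 else 0 := by
  simp only [pvHit, pvNorm]
  split_ifs <;> omega

-- characterization of one Python `M[i][j] += v`
lemma pv_set_cell (M : List (List Int)) (n m : Nat) (R : List Int) (v : Int)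
    (hn : n < M.length) (hR : M.getD n [] = R) (a b : Nat) :
    pvCell (M.set n (R.set m (R.getD m 0 + v))) a b
      = pvCell M a b + if a = n ∧ b = m ∧ m < R.length then v else 0 := by
  simp only [pvCell, List.getD_eq_getElem?_getD, List.getElem?_set] at *
  by_cases han : n = a
  · subst han
    rw [if_pos rfl, if_pos hn]
    simp only [Option.getD_some, List.getElem?_set]
    by_cases hbm : m = b
    · subst hbm
      rw [if_pos rfl, hR]
      by_cases hm : m < R.length
      · simp [hm]
      · have h0 : R[m]? = none := by rw [List.getElem?_eq_none_iff]; omega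
        simp [hm, h0]
    · rw [if_neg hbm, if_neg (fun h => hbm h.2.1.symm : ¬(True ∧ b = m ∧ m < R.length)), hR]
      simp
  · rw [if_neg han, if_neg (fun h => han h.1.symm : ¬(a = n ∧ b = m ∧ m < R.length))]
    simp

lemma pyAdd2_char {P S : Nat} (M : List (List Int)) (i j v : Int) (hM : pvShape P S M) :
    pvShape P S (pyAdd2 M i j v) ∧
      ∀ a b, pvCell (pyAdd2 M i j v) a b = pvCell M a b + pvHit P i a * pvHit S j b * v := by
  obtain ⟨hlen, hrows⟩ := hM
  simp only [pyAdd2]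
  set I : Int := if i < 0 then i + (M.length : Int) else i with hI
  have hnormP : pvNorm P i = I := by rw [hI, ← hlen]; rfl
  by_cases h1 : 0 ≤ I ∧ I < (M.length : Int)
  · rw [if_pos h1]
    have hiNat : I.toNat < M.length := by omega
    set R : List Int := M.getD I.toNat [] with hR
    have hrowmem : R ∈ M := by
      rw [hR, List.getD_eq_getElem?_getD, List.getElem?_eq_getElem hiNat]
      exact List.getElem_mem _
    have hrowlen : R.length = S := hrows _ hrowmem
    set J : Int := if j < 0 then j + (R.length : Int) else j with hJ
    have hnormS : pvNorm S j = J := by rw [hJ, ← hrowlen]; rfl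
    by_cases h2 : 0 ≤ J ∧ J < (R.length : Int)
    · rw [if_pos h2]
      constructor
      · constructor
        · simp [hlen]
        · intro r hr
          rcases List.mem_or_eq_of_mem_set hr with h | h
          · exact hrows _ h
          · rw [h, List.length_set, hrowlen]
      · intro a b
        rw [pv_set_cell M I.toNat J.toNat R v hiNat hR.symm a b]
        have hP : pvHit P i a = if a = I.toNat then 1 else 0 := by
          simp only [pvHit, hnormP]
          split_ifs <;> omega
        have hS : pvHit S j b = if b = J.toNat then 1 else 0 := by
          simp only [pvHit, hnormS]
          split_ifs <;> omega
        rw [hP, hS]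
        by_cases hA : a = I.toNat <;> by_cases hB : b = J.toNat <;> simp [hA, hB] <;>
          first
            | (intro hcon; exact absurd hcon (by omega))
            | rw [if_neg (by omega)]
    · rw [if_neg h2]
      refine ⟨⟨hlen, hrows⟩, fun a b => ?_⟩
      have hz : pvHit S j b = 0 := by
        simp only [pvHit, hnormS]
        rw [if_neg (by omega)]
      rw [hz]; ring
  · rw [if_neg h1]
    refine ⟨⟨hlen, hrows⟩, fun a b => ?_⟩
    have hz : pvHit P i a = 0 := by
      simp only [pvHit, hnormP]
      rw [if_neg (by omega)]
    rw [hz]; ring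

-- generic accumulation loop: shapes are preserved and cells add up
lemma pv_foldl_cell {α : Type} {P S : Nat} (step : List (List Int) → α → List (List Int))
    (f : α → Nat → Nat → Int)
    (hstep : ∀ M x, pvShape P S M → pvShape P S (step M x) ∧
      ∀ a b, pvCell (step M x) a b = pvCell M a b + f x a b) :
    ∀ (L : List α) (M : List (List Int)), pvShape P S M →
      pvShape P S (L.foldl step M) ∧
        ∀ a b, pvCell (L.foldl step M) a b = pvCell M a b + (L.map (fun x => f x a b)).sum := by
  intro L
  induction L with
  | nil => intro M hM; exact ⟨hM, by simp⟩
  | cons x L ih =>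
    intro M hM
    obtain ⟨h1, h2⟩ := hstep M x hM
    obtain ⟨h3, h4⟩ := ih (step M x) h1
    refine ⟨h3, fun a b => ?_⟩
    simp only [List.foldl_cons, List.map_cons, List.sum_cons, h4, h2]
    ring

lemma pv_sum_ite_eq (xs : List Int) (q : Int) (h : Int → Int) :
    (xs.map (fun y => if y = q then h y else 0)).sum = (xs.count q : Int) * h q := by
  induction xs with
  | nil => simp
  | cons x xs ih =>
    by_cases hx : x = q <;> simp [List.count_cons, hx, ih] <;> ring

lemma pv_sum_sub (xs : List Int) (h g : Int → Int) :
    (xs.map (fun y => h y - g y)).sum = (xs.map h).sum - (xs.map g).sum := by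
  induction xs with
  | nil => simp
  | cons x xs ih => simp [ih]; ring

-- the student double loop, collapsed
lemma pv_double_sum (xs : List Int) (h : Int → Int) :
    (xs.map (fun x => (xs.map (fun y => if y ≠ x then h y + h x else 0)).sum)).sum
      = 2 * (xs.map (fun y => h y * ((xs.length : Int) - (xs.count y : Int)))).sum := by
  have hL : ∀ x ∈ xs, (xs.map (fun y => if y ≠ x then h y + h x else 0)).sum
      = ((xs.map h).sum + (xs.length : Int) * h x) - (xs.count x : Int) * (h x + h x) := by
    intro x _
    have hpt : ∀ y ∈ xs, (if y ≠ x then h y + h x else 0)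
        = (h y + h x) - (if y = x then h y + h x else 0) := by
      intro y _; by_cases hy : y = x <;> simp [hy]
    rw [List.map_congr_left hpt,
      pv_sum_sub xs (fun y => h y + h x) (fun y => if y = x then h y + h x else 0),
      pv_sum_ite_eq, List.sum_map_add]
    have hc : (xs.map (fun _ => h x)).sum = (xs.length : Int) * h x := by
      rw [List.map_const']; simp [List.sum_replicate, mul_comm]
    rw [hc]
  rw [List.map_congr_left hL,
    pv_sum_sub xs (fun x => (xs.map h).sum + (xs.length : Int) * h x)
      (fun x => (xs.count x : Int) * (h x + h x)),
    List.sum_map_add]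
  have hT : (xs.map (fun _ => (xs.map h).sum)).sum = (xs.length : Int) * (xs.map h).sum := by
    rw [List.map_const']; simp [List.sum_replicate, mul_comm]
  have h1 : (xs.map (fun x => (xs.length : Int) * h x)).sum
      = (xs.length : Int) * (xs.map h).sum := List.sum_map_mul_left xs h _
  have h2 : (xs.map (fun x => (xs.count x : Int) * (h x + h x))).sum
      = 2 * (xs.map (fun y => (xs.count y : Int) * h y)).sum := by
    have : ∀ x ∈ xs, (xs.count x : Int) * (h x + h x) = 2 * ((xs.count x : Int) * h x) := by
      intro x _; ring
    rw [List.map_congr_left this, List.sum_map_mul_left]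
  have h3 : (xs.map (fun y => h y * ((xs.length : Int) - (xs.count y : Int)))).sum
      = (xs.length : Int) * (xs.map h).sum - (xs.map (fun y => (xs.count y : Int) * h y)).sum := by
    have : ∀ y ∈ xs, h y * ((xs.length : Int) - (xs.count y : Int))
        = (xs.length : Int) * h y - (xs.count y : Int) * h y := by intro y _; ring
    rw [List.map_congr_left this,
      pv_sum_sub xs (fun y => (xs.length : Int) * h y) (fun y => (xs.count y : Int) * h y), h1]
  rw [hT, h1, h2, h3]
  ring

lemma pv_sum_ite_eq_nat (xs : List Nat) (q : Nat) (h : Nat → Int) :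
    (xs.map (fun y => if y = q then h y else 0)).sum = (xs.count q : Int) * h q := by
  induction xs with
  | nil => simp
  | cons x xs ih =>
    by_cases hx : x = q <;> simp [List.count_cons, hx, ih] <;> ring

-- distinct-values sum collapse (DecidableEq version for strings)
lemma pv_sum_ite_eq_str (xs : List String) (q : String) (h : String → Int) :
    (xs.map (fun y => if y = q then h y else 0)).sum = (xs.count q : Int) * h q := by
  induction xs with
  | nil => simp
  | cons x xs ih =>
    by_cases hx : x = q <;> simp [List.count_cons, hx, ih] <;> ring

-- count of one index inside the enumerate list, filtered by a slot predicate
lemma pv_enum_countP (ds : List (String × String × Int × Int)) (s q : Int)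
    (g : (String × String × Int × Int) → Bool) :
    (PySem.List.enumerate ds s).countP (fun si => g si.2 && (si.1 == q))
      = if s ≤ q ∧ q < s + ds.length ∧ g (ds.getD (q - s).toNat ("", "", 0, 0)) = true then 1 else 0 := by
  induction ds generalizing s with
  | nil =>
    simp only [PySem.List.enumerate_nil, List.countP_nil, List.length_nil]
    rw [if_neg (by rintro ⟨h1, h2, -⟩; omega)]
  | cons x xs ih =>
    rw [PySem.List.enumerate_cons, List.countP_cons, ih (s + 1)]
    by_cases hqs : q = s
    · subst hqs
      rw [if_neg (by rintro ⟨h1, -, -⟩; omega)]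
      have h0 : (q - q).toNat = 0 := by omega
      simp only [h0, List.getD_cons_zero, List.length_cons, beq_self_eq_true, Bool.and_true]
      split_ifs with h <;> simp_all
    · have hhead : (g x && (s == q)) = false := by
        simp [show ¬(s = q) from fun h => hqs h.symm]
      rw [hhead]
      simp only [List.length_cons, if_false_right, Bool.false_eq_true, if_false, add_zero]
      by_cases hlt : s < q
      · have hn : (q - s).toNat = (q - (s + 1)).toNat + 1 := by omega
        rw [hn, List.getD_cons_succ]
        have hiff : (s + 1 ≤ q ∧ q < s + 1 + (xs.length : Int) ∧ g (xs.getD (q - (s + 1)).toNat ("", "", 0, 0)) = true)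
            ↔ (s ≤ q ∧ q < s + ((xs.length : Int) + 1) ∧ g (xs.getD (q - (s + 1)).toNat ("", "", 0, 0)) = true) := by
          constructor <;> rintro ⟨h1, h2, h3⟩ <;> exact ⟨by omega, by omega, h3⟩
        rw [if_congr hiff rfl rfl]
        norm_cast
      · rw [if_neg (by rintro ⟨h1, -, -⟩; omega), if_neg (by rintro ⟨h1, -, -⟩; omega)]

-- countP of a slot predicate through enumerate
lemma pv_enum_countP_snd (ds : List (String × String × Int × Int)) (s : Int)
    (g : (String × String × Int × Int) → Bool) :
    (PySem.List.enumerate ds s).countP (fun si => g si.2) = ds.countP g := by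
  induction ds generalizing s with
  | nil => simp [PySem.List.enumerate_nil]
  | cons x xs ih => simp [PySem.List.enumerate_cons, List.countP_cons, ih]

-- a group's pvHit-sum is its count of b (members are slot indices in [0, S))
lemma pv_hits_count (S : Nat) (b : Nat) (G : List Int) (hG : ∀ s ∈ G, 0 ≤ s ∧ s < (S : Int)) :
    (G.map (fun s => pvHit S s b)).sum = (G.count (b : Int) : Int) := by
  induction G with
  | nil => simp
  | cons x G ih =>
    obtain ⟨hx0, hxS⟩ := hG x (List.mem_cons_self)
    have ih' := ih (fun s hs => hG s (List.mem_cons_of_mem _ hs))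
    have hhit : pvHit S x b = if x = (b : Int) then 1 else 0 := by
      simp only [pvHit, pvNorm]; split_ifs <;> omega
    rw [List.map_cons, List.sum_cons, hhit, ih']
    by_cases hx : x = (b : Int) <;> simp [hx, List.count_cons] <;> push_cast <;> omega

-- the grouping dict of port A and the row-weight dict of port B, named for the lemmas
def pvSbd (ds : List (String × String × Int × Int)) : PySem.Dict String (List Int) :=
  (PySem.List.enumerate ds 0).foldl (fun d si => d.modify si.2.1 [] (· ++ [si.1])) PySem.Dict.empty

def pvRW (sa : List (Int × List (Int × List Int))) : PySem.Dict Int Int :=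
  sa.foldl (fun rw st =>
    (PySem.Dict.counter (st.2.map (fun e => e.1))).items.foldl (fun rw pm =>
      if pm.2 ≠ (st.2.length : Int) then rw.modify pm.1 0 (· + 2 * pm.2 * ((st.2.length : Int) - pm.2)) else rw) rw)
    PySem.Dict.empty

-- per-slot weight: number of slots sharing slot b's date
def pvGB (ds : List (String × String × Int × Int)) (b : Nat) : Int :=
  if b < ds.length then (((ds.map (fun s => s.1)).count ((ds.getD b ("", "", 0, 0)).1) : Nat) : Int) else 0

def pvContrib (xs : List Int) (q : Int) : Int :=
  2 * (xs.count q : Int) * ((xs.length : Int) - (xs.count q : Int))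

-- the date-group triple sum of A collapses to a product with pvGB
lemma pv_gb_sum (ds : List (String × String × Int × Int)) (b : Nat) (C1 C2 : Int) :
    ((pvSbd ds).items.map (fun dg => (dg.2.map (fun s1 => (dg.2.map (fun s2 =>
        C1 * pvHit ds.length s1 b * 1 + C2 * pvHit ds.length s2 b * 1)).sum)).sum)).sum
      = (C1 + C2) * pvGB ds b := by
  have hkeys : (pvSbd ds).keys = PySem.Set.ofList (ds.map (fun x => x.1)) := by
    rw [pvSbd]
    rw [PySem.Dict.keys_foldl_modify_key (PySem.List.enumerate ds 0) (fun si => si.2.1)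
      ([] : List Int) (fun _ si => (· ++ [si.1])) PySem.Dict.empty]
    rw [PySem.Dict.keys_empty, PySem.Set.update_nil_left]
    have h1 : (PySem.List.enumerate ds 0).map (fun si => si.2.1) = ds.map (fun x => x.1) := by
      calc (PySem.List.enumerate ds 0).map (fun si => si.2.1)
          = ((PySem.List.enumerate ds 0).map (fun x => x.2)).map (fun x => x.1) := by
            rw [List.map_map]; rfl
        _ = ds.map (fun x => x.1) := by rw [PySem.List.map_snd_enumerate]
    rw [h1]
  have hnd : (pvSbd ds).keys.Nodup := by
    rw [pvSbd]
    exact PySem.Dict.nodup_keys_foldl_modify_key (PySem.List.enumerate ds 0) (fun si => si.2.1)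
      ([] : List Int) (fun _ si => (· ++ [si.1])) PySem.Dict.empty (by simp)
  have hgetD : ∀ c, (pvSbd ds).getD c []
      = ((PySem.List.enumerate ds 0).filter (fun si => si.2.1 == c)).map (fun si => si.1) := by
    intro c
    have hsh : pvSbd ds = ((PySem.List.enumerate ds 0).map
        (fun si => (si.2.1, si.1))).foldl (fun d p => d.modify p.1 [] (· ++ [p.2])) PySem.Dict.empty := by
      rw [pvSbd, List.foldl_map]
    rw [hsh, PySem.Dict.getD_foldl_modify_append, List.filter_map, List.map_map]
    simp only [PySem.Dict.getD_empty, List.nil_append]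
    rfl
  have hmem : ∀ c, ∀ s ∈ (pvSbd ds).getD c [], 0 ≤ s ∧ s < (ds.length : Int) := by
    intro c s hs
    rw [hgetD] at hs
    obtain ⟨si, hsi, rfl⟩ := List.mem_map.mp hs
    obtain ⟨k, hk, hp⟩ := (PySem.List.mem_enumerate_iff _ _ _).mp (List.mem_filter.mp hsi).1
    rw [hp]
    constructor <;> simp <;> omega
  -- collapse the two inner loops of one group
  have hF : ∀ G : List Int, (∀ s ∈ G, 0 ≤ s ∧ s < (ds.length : Int)) →
      (G.map (fun s1 => (G.map (fun s2 =>
          C1 * pvHit ds.length s1 b * 1 + C2 * pvHit ds.length s2 b * 1)).sum)).sum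
        = (G.length : Int) * (C1 + C2) * (G.count (b : Int) : Int) := by
    intro G hG
    have hin : ∀ s1 ∈ G, (G.map (fun s2 =>
        C1 * pvHit ds.length s1 b * 1 + C2 * pvHit ds.length s2 b * 1)).sum
          = (G.length : Int) * (C1 * pvHit ds.length s1 b)
            + C2 * (G.count (b : Int) : Int) := by
      intro s1 _
      rw [List.sum_map_add]
      have hc : (G.map (fun _ => C1 * pvHit ds.length s1 b * 1)).sum
          = (G.length : Int) * (C1 * pvHit ds.length s1 b) := by
        rw [List.map_const']; simp [List.sum_replicate, mul_comm]
      have hd : (G.map (fun s2 => C2 * pvHit ds.length s2 b * 1)).sum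
          = C2 * (G.count (b : Int) : Int) := by
        have h5 : ∀ s2 ∈ G, C2 * pvHit ds.length s2 b * 1 = C2 * pvHit ds.length s2 b := by
          intro s2 _; ring
        rw [List.map_congr_left h5, List.sum_map_mul_left, pv_hits_count _ _ _ hG]
      rw [hc, hd]
    rw [List.map_congr_left hin, List.sum_map_add]
    have h1 : (G.map (fun s1 => (G.length : Int) * (C1 * pvHit ds.length s1 b))).sum
        = (G.length : Int) * (C1 * (G.count (b : Int) : Int)) := by
      rw [List.sum_map_mul_left]
      have h6 : (G.map (fun s1 => C1 * pvHit ds.length s1 b)).sum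
          = C1 * (G.count (b : Int) : Int) := by
        rw [List.sum_map_mul_left, pv_hits_count _ _ _ hG]
      rw [h6]
    have h2 : (G.map (fun _ => C2 * (G.count (b : Int) : Int))).sum
        = (G.length : Int) * (C2 * (G.count (b : Int) : Int)) := by
      rw [List.map_const']; simp [List.sum_replicate, mul_comm]
    rw [h1, h2]; ring
  rw [PySem.Dict.items_eq_map_keys _ hnd [], List.map_map]
  have hcomp : ((fun dg : String × List Int => (dg.2.map (fun s1 => (dg.2.map (fun s2 =>
        C1 * pvHit ds.length s1 b * 1 + C2 * pvHit ds.length s2 b * 1)).sum)).sum)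
      ∘ (fun k => (k, (pvSbd ds).getD k [])))
      = fun c => ((((pvSbd ds).getD c []).map (fun s1 => ((((pvSbd ds).getD c [])).map (fun s2 =>
        C1 * pvHit ds.length s1 b * 1 + C2 * pvHit ds.length s2 b * 1)).sum)).sum) := rfl
  rw [hcomp]
  have hstep : ∀ c ∈ (pvSbd ds).keys,
      ((((pvSbd ds).getD c []).map (fun s1 => ((((pvSbd ds).getD c [])).map (fun s2 =>
          C1 * pvHit ds.length s1 b * 1 + C2 * pvHit ds.length s2 b * 1)).sum)).sum)
        = (ds.countP (fun x => x.1 == c) : Int) * (C1 + C2)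
          * (if b < ds.length ∧ (ds.getD b ("", "", 0, 0)).1 = c then 1 else 0) := by
    intro c _
    rw [hF _ (hmem c)]
    have hlenG : ((pvSbd ds).getD c []).length = ds.countP (fun x => x.1 == c) := by
      rw [hgetD, List.length_map, ← List.countP_eq_length_filter]
      exact pv_enum_countP_snd ds 0 (fun x => x.1 == c)
    have hcnt : (((pvSbd ds).getD c []).count (b : Int))
        = if b < ds.length ∧ (ds.getD b ("", "", 0, 0)).1 = c then 1 else 0 := by
      rw [hgetD, List.count_eq_countP, List.countP_map, List.countP_filter]
      have h8 : (fun si : Int × (String × String × Int × Int) =>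
          ((fun x => x == (b : Int)) ∘ fun si : Int × (String × String × Int × Int) => si.1) si
            && si.2.1 == c)
          = (fun si : Int × (String × String × Int × Int) => (si.2.1 == c) && (si.1 == (b : Int))) := by
        funext si; simp [Bool.and_comm]
      rw [h8, pv_enum_countP ds 0 (b : Int) (fun x => x.1 == c)]
      have h9 : ((b : Int) - 0).toNat = b := by omega
      split_ifs with hA hB hB
      · rfl
      · exact absurd ⟨by omega, by rw [← h9]; simpa using hA.2.2⟩ hB
      · exact absurd ⟨by omega, by push_cast; omega, by rw [h9] at *; simpa using hB.2⟩ hA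
      · rfl
    rw [hlenG, hcnt]
    push_cast
    by_cases h : b < ds.length ∧ (ds.getD b ("", "", 0, 0)).1 = c <;> simp [h]
  rw [List.map_congr_left hstep]
  by_cases hb : b < ds.length
  · have hmemk : (ds.getD b ("", "", 0, 0)).1 ∈ (pvSbd ds).keys := by
      rw [hkeys, PySem.Set.mem_ofList]
      have hbm : ds.getD b ("", "", 0, 0) ∈ ds := by
        rw [List.getD_eq_getElem?_getD, List.getElem?_eq_getElem hb, Option.getD_some]
        exact List.getElem_mem hb
      exact List.mem_map_of_mem hbm
    have hpt : ∀ c ∈ (pvSbd ds).keys,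
        (ds.countP (fun x => x.1 == c) : Int) * (C1 + C2)
            * (if b < ds.length ∧ (ds.getD b ("", "", 0, 0)).1 = c then 1 else 0)
          = if c = (ds.getD b ("", "", 0, 0)).1
              then (ds.countP (fun x => x.1 == c) : Int) * (C1 + C2) else 0 := by
      intro c _
      by_cases hc : c = (ds.getD b ("", "", 0, 0)).1
      · rw [if_pos hc, if_pos ⟨hb, hc.symm⟩]; ring
      · rw [if_neg hc, if_neg (fun h => hc h.2.symm), mul_zero]
    rw [List.map_congr_left hpt, pv_sum_ite_eq_str,
      List.count_eq_one_of_mem hnd hmemk]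
    rw [pvGB, if_pos hb, List.count_eq_countP]
    have hcc : List.countP (fun x => x == (ds.getD b ("", "", 0, 0)).1) (ds.map (fun s => s.1))
        = List.countP (fun x => x.1 == (ds.getD b ("", "", 0, 0)).1) ds := List.countP_map
    rw [hcc]
    push_cast
    ring
  · have hpt : ∀ c ∈ (pvSbd ds).keys,
        (ds.countP (fun x => x.1 == c) : Int) * (C1 + C2)
            * (if b < ds.length ∧ (ds.getD b ("", "", 0, 0)).1 = c then 1 else 0) = 0 := by
      intro c _
      rw [if_neg (fun h => hb h.1), mul_zero]
    rw [List.map_congr_left hpt, pvGB, if_neg hb, mul_zero]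
    simp

-- cell value of port A
lemma pv_cellA (cp : List Int) (sa : List (Int × List (Int × List Int))) (ds : List (String × String × Int × Int)) :
    pvShape cp.length ds.length (detect_scheduling_conflicts cp sa ds) ∧
      ∀ a b : Nat, pvCell (detect_scheduling_conflicts cp sa ds) a b
        = (sa.map (fun st => 2 * (((st.2.map (fun e => e.1)).map (fun y =>
            pvHit cp.length y a * (((st.2.map (fun e => e.1)).length : Int) - ((st.2.map (fun e => e.1)).count y : Int)))).sum))).sum
          * pvGB ds b := by
  have hA : detect_scheduling_conflicts cp sa ds
      = sa.foldl (fun M st => st.2.foldl (fun M e => st.2.foldl (fun M e1 =>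
          if e1.1 ≠ e.1 then (pvSbd ds).items.foldl (fun M dg => dg.2.foldl (fun M s1 =>
            dg.2.foldl (fun M s2 => pyAdd2 (pyAdd2 M e1.1 s1 1) e.1 s2 1) M) M) M else M) M) M)
        ((List.range cp.length).map (fun _ => (List.range ds.length).map (fun _ => (0 : Int)))) := rfl
  have hsc : pvShape cp.length ds.length ((List.range cp.length).map (fun _ => (List.range ds.length).map (fun _ => (0 : Int)))) := by
    constructor
    · simp
    · intro r hr
      obtain ⟨x, _, rfl⟩ := List.mem_map.mp hr
      simp
  have hcell0 : ∀ a b, pvCell ((List.range cp.length).map (fun _ => (List.range ds.length).map (fun _ => (0 : Int)))) a b = 0 := by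
    intro a b
    simp only [pvCell, List.getD_eq_getElem?_getD, List.getElem?_map]
    by_cases ha : a < cp.length
    · simp [List.getElem?_range, ha]
    · simp [List.getElem?_range, ha]
  have hlvl_s2 : ∀ (p p1 s1 : Int) (G : List Int) (M : List (List Int)), pvShape cp.length ds.length M →
      pvShape cp.length ds.length (G.foldl (fun M s2 => pyAdd2 (pyAdd2 M p1 s1 1) p s2 1) M) ∧
        ∀ a b, pvCell (G.foldl (fun M s2 => pyAdd2 (pyAdd2 M p1 s1 1) p s2 1) M) a b
          = pvCell M a b + (G.map (fun s2 =>
              pvHit cp.length p1 a * pvHit ds.length s1 b * 1 + pvHit cp.length p a * pvHit ds.length s2 b * 1)).sum :=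
    fun p p1 s1 G M hM =>
      pv_foldl_cell (fun M s2 => pyAdd2 (pyAdd2 M p1 s1 1) p s2 1)
        (fun s2 a b => pvHit cp.length p1 a * pvHit ds.length s1 b * 1 + pvHit cp.length p a * pvHit ds.length s2 b * 1)
        (fun M s2 hM5 => by
          obtain ⟨h1, h2⟩ := pyAdd2_char M p1 s1 1 hM5
          obtain ⟨h3, h4⟩ := pyAdd2_char _ p s2 1 h1
          exact ⟨h3, fun a b => by rw [h4, h2]; ring⟩)
        G M hM
  have hlvl_s1 : ∀ (p p1 : Int) (G : List Int) (M : List (List Int)), pvShape cp.length ds.length M →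
      pvShape cp.length ds.length (G.foldl (fun M s1 => G.foldl (fun M s2 => pyAdd2 (pyAdd2 M p1 s1 1) p s2 1) M) M) ∧
        ∀ a b, pvCell (G.foldl (fun M s1 => G.foldl (fun M s2 => pyAdd2 (pyAdd2 M p1 s1 1) p s2 1) M) M) a b
          = pvCell M a b + (G.map (fun s1 => (G.map (fun s2 =>
              pvHit cp.length p1 a * pvHit ds.length s1 b * 1 + pvHit cp.length p a * pvHit ds.length s2 b * 1)).sum)).sum :=
    fun p p1 G M hM =>
      pv_foldl_cell (fun M s1 => G.foldl (fun M s2 => pyAdd2 (pyAdd2 M p1 s1 1) p s2 1) M)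
        (fun s1 a b => (G.map (fun s2 =>
          pvHit cp.length p1 a * pvHit ds.length s1 b * 1 + pvHit cp.length p a * pvHit ds.length s2 b * 1)).sum)
        (fun M s1 hM4 => hlvl_s2 p p1 s1 G M hM4) G M hM
  have hlvl_dg : ∀ (p p1 : Int) (M : List (List Int)), pvShape cp.length ds.length M →
      pvShape cp.length ds.length ((pvSbd ds).items.foldl (fun M dg => dg.2.foldl (fun M s1 =>
          dg.2.foldl (fun M s2 => pyAdd2 (pyAdd2 M p1 s1 1) p s2 1) M) M) M) ∧
        ∀ a b, pvCell ((pvSbd ds).items.foldl (fun M dg => dg.2.foldl (fun M s1 =>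
            dg.2.foldl (fun M s2 => pyAdd2 (pyAdd2 M p1 s1 1) p s2 1) M) M) M) a b
          = pvCell M a b + ((pvSbd ds).items.map (fun dg => (dg.2.map (fun s1 => (dg.2.map (fun s2 =>
              pvHit cp.length p1 a * pvHit ds.length s1 b * 1 + pvHit cp.length p a * pvHit ds.length s2 b * 1)).sum)).sum)).sum :=
    fun p p1 M hM =>
      pv_foldl_cell (fun M dg => dg.2.foldl (fun M s1 =>
          dg.2.foldl (fun M s2 => pyAdd2 (pyAdd2 M p1 s1 1) p s2 1) M) M)
        (fun dg a b => (dg.2.map (fun s1 => (dg.2.map (fun s2 =>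
          pvHit cp.length p1 a * pvHit ds.length s1 b * 1 + pvHit cp.length p a * pvHit ds.length s2 b * 1)).sum)).sum)
        (fun M dg hM3 => hlvl_s1 p p1 dg.2 M hM3) (pvSbd ds).items M hM
  have hlvl_e1 : ∀ (e : Int × List Int) (L : List (Int × List Int)) (M : List (List Int)), pvShape cp.length ds.length M →
      pvShape cp.length ds.length (L.foldl (fun M e1 =>
          if e1.1 ≠ e.1 then (pvSbd ds).items.foldl (fun M dg => dg.2.foldl (fun M s1 =>
            dg.2.foldl (fun M s2 => pyAdd2 (pyAdd2 M e1.1 s1 1) e.1 s2 1) M) M) M else M) M) ∧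
        ∀ a b, pvCell (L.foldl (fun M e1 =>
            if e1.1 ≠ e.1 then (pvSbd ds).items.foldl (fun M dg => dg.2.foldl (fun M s1 =>
              dg.2.foldl (fun M s2 => pyAdd2 (pyAdd2 M e1.1 s1 1) e.1 s2 1) M) M) M else M) M) a b
          = pvCell M a b + (L.map (fun e1 =>
              if e1.1 ≠ e.1 then ((pvSbd ds).items.map (fun dg => (dg.2.map (fun s1 => (dg.2.map (fun s2 =>
                pvHit cp.length e1.1 a * pvHit ds.length s1 b * 1 + pvHit cp.length e.1 a * pvHit ds.length s2 b * 1)).sum)).sum)).sum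
              else 0)).sum :=
    fun e L M hM =>
      pv_foldl_cell (fun M e1 =>
          if e1.1 ≠ e.1 then (pvSbd ds).items.foldl (fun M dg => dg.2.foldl (fun M s1 =>
            dg.2.foldl (fun M s2 => pyAdd2 (pyAdd2 M e1.1 s1 1) e.1 s2 1) M) M) M else M)
        (fun e1 a b =>
          if e1.1 ≠ e.1 then ((pvSbd ds).items.map (fun dg => (dg.2.map (fun s1 => (dg.2.map (fun s2 =>
            pvHit cp.length e1.1 a * pvHit ds.length s1 b * 1 + pvHit cp.length e.1 a * pvHit ds.length s2 b * 1)).sum)).sum)).sum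
          else 0)
        (fun M e1 hM'' => by
          beta_reduce
          by_cases hne : e1.1 ≠ e.1
          · rw [if_pos hne]
            obtain ⟨hs1, hc1⟩ := hlvl_dg e.1 e1.1 M hM''
            exact ⟨hs1, fun a b => by rw [hc1 a b, if_pos hne]⟩
          · rw [if_neg hne]
            exact ⟨hM'', fun a b => by rw [if_neg hne, add_zero]⟩)
        L M hM
  have hfold : pvShape cp.length ds.length (sa.foldl (fun M st => st.2.foldl (fun M e => st.2.foldl (fun M e1 =>
        if e1.1 ≠ e.1 then (pvSbd ds).items.foldl (fun M dg => dg.2.foldl (fun M s1 =>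
          dg.2.foldl (fun M s2 => pyAdd2 (pyAdd2 M e1.1 s1 1) e.1 s2 1) M) M) M else M) M) M)
        ((List.range cp.length).map (fun _ => (List.range ds.length).map (fun _ => (0 : Int))))) ∧
      ∀ a b, pvCell (sa.foldl (fun M st => st.2.foldl (fun M e => st.2.foldl (fun M e1 =>
          if e1.1 ≠ e.1 then (pvSbd ds).items.foldl (fun M dg => dg.2.foldl (fun M s1 =>
            dg.2.foldl (fun M s2 => pyAdd2 (pyAdd2 M e1.1 s1 1) e.1 s2 1) M) M) M else M) M) M)
          ((List.range cp.length).map (fun _ => (List.range ds.length).map (fun _ => (0 : Int))))) a b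
        = pvCell ((List.range cp.length).map (fun _ => (List.range ds.length).map (fun _ => (0 : Int)))) a b
          + (sa.map (fun st => (st.2.map (fun e => (st.2.map (fun e1 =>
              if e1.1 ≠ e.1 then ((pvSbd ds).items.map (fun dg => (dg.2.map (fun s1 => (dg.2.map (fun s2 =>
                pvHit cp.length e1.1 a * pvHit ds.length s1 b * 1 + pvHit cp.length e.1 a * pvHit ds.length s2 b * 1)).sum)).sum)).sum
              else 0)).sum)).sum)).sum :=
    pv_foldl_cell (fun M st => st.2.foldl (fun M e => st.2.foldl (fun M e1 =>
        if e1.1 ≠ e.1 then (pvSbd ds).items.foldl (fun M dg => dg.2.foldl (fun M s1 =>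
          dg.2.foldl (fun M s2 => pyAdd2 (pyAdd2 M e1.1 s1 1) e.1 s2 1) M) M) M else M) M) M)
      (fun st a b => (st.2.map (fun e => (st.2.map (fun e1 =>
          if e1.1 ≠ e.1 then ((pvSbd ds).items.map (fun dg => (dg.2.map (fun s1 => (dg.2.map (fun s2 =>
            pvHit cp.length e1.1 a * pvHit ds.length s1 b * 1 + pvHit cp.length e.1 a * pvHit ds.length s2 b * 1)).sum)).sum)).sum
          else 0)).sum)).sum)
      (fun M st hM =>
        pv_foldl_cell (fun M e => st.2.foldl (fun M e1 =>
            if e1.1 ≠ e.1 then (pvSbd ds).items.foldl (fun M dg => dg.2.foldl (fun M s1 =>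
              dg.2.foldl (fun M s2 => pyAdd2 (pyAdd2 M e1.1 s1 1) e.1 s2 1) M) M) M else M) M)
          (fun e a b => (st.2.map (fun e1 =>
            if e1.1 ≠ e.1 then ((pvSbd ds).items.map (fun dg => (dg.2.map (fun s1 => (dg.2.map (fun s2 =>
              pvHit cp.length e1.1 a * pvHit ds.length s1 b * 1 + pvHit cp.length e.1 a * pvHit ds.length s2 b * 1)).sum)).sum)).sum
            else 0)).sum)
          (fun M e hM' => hlvl_e1 e st.2 M hM') st.2 M hM)
      sa _ hsc
  rw [hA]
  obtain ⟨hshape, hcells⟩ := hfold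
  refine ⟨hshape, fun a b => ?_⟩
  rw [hcells a b, hcell0, zero_add]
  have hstud : ∀ st ∈ sa, (st.2.map (fun e => (st.2.map (fun e1 =>
      if e1.1 ≠ e.1 then ((pvSbd ds).items.map (fun dg => (dg.2.map (fun s1 => (dg.2.map (fun s2 =>
        pvHit cp.length e1.1 a * pvHit ds.length s1 b * 1 + pvHit cp.length e.1 a * pvHit ds.length s2 b * 1)).sum)).sum)).sum
      else 0)).sum)).sum
      = (2 * (((st.2.map (fun e => e.1)).map (fun y =>
          pvHit cp.length y a * (((st.2.map (fun e => e.1)).length : Int) - ((st.2.map (fun e => e.1)).count y : Int)))).sum))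
        * pvGB ds b := by
    intro st _
    have hinner : ∀ e ∈ st.2, (st.2.map (fun e1 =>
        if e1.1 ≠ e.1 then ((pvSbd ds).items.map (fun dg => (dg.2.map (fun s1 => (dg.2.map (fun s2 =>
          pvHit cp.length e1.1 a * pvHit ds.length s1 b * 1 + pvHit cp.length e.1 a * pvHit ds.length s2 b * 1)).sum)).sum)).sum
        else 0)).sum
        = (st.2.map (fun e1 => (if e1.1 ≠ e.1 then pvHit cp.length e1.1 a + pvHit cp.length e.1 a else 0))).sum
          * pvGB ds b := by
      intro e _
      rw [← List.sum_map_mul_right]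
      apply congrArg
      apply List.map_congr_left
      intro e1 _
      by_cases hne : e1.1 ≠ e.1
      · rw [if_pos hne, if_pos hne, pv_gb_sum ds b (pvHit cp.length e1.1 a) (pvHit cp.length e.1 a)]
      · rw [if_neg hne, if_neg hne, zero_mul]
    rw [List.map_congr_left hinner, List.sum_map_mul_right]
    have hxs : (st.2.map (fun e => (st.2.map (fun e1 =>
        if e1.1 ≠ e.1 then pvHit cp.length e1.1 a + pvHit cp.length e.1 a else 0)).sum)).sum
        = ((st.2.map (fun e => e.1)).map (fun x => ((st.2.map (fun e => e.1)).map (fun y =>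
            if y ≠ x then pvHit cp.length y a + pvHit cp.length x a else 0)).sum)).sum := by
      simp only [List.map_map]
      rfl
    rw [hxs, pv_double_sum (st.2.map (fun e => e.1)) (fun q => pvHit cp.length q a)]
  rw [List.map_congr_left hstud, List.sum_map_mul_right]

-- row-weight dict lookups of port B
lemma pv_rw_getD (sa : List (Int × List (Int × List Int))) (q : Int) :
    (pvRW sa).getD q 0 = (sa.map (fun st => pvContrib (st.2.map (fun e => e.1)) q)).sum := by
  have hinner : ∀ (n : Int) (L : List (Int × Int)) (rw : PySem.Dict Int Int),
      ((L.foldl (fun rw pm => if pm.2 ≠ n then rw.modify pm.1 0 (· + 2 * pm.2 * (n - pm.2)) else rw) rw).getD q 0)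
        = rw.getD q 0 + (L.map (fun pm => if pm.1 = q ∧ pm.2 ≠ n then 2 * pm.2 * (n - pm.2) else 0)).sum := by
    intro n L
    induction L with
    | nil => intro rw; simp
    | cons pm L ih =>
      intro rw
      rw [List.foldl_cons, ih, List.map_cons, List.sum_cons]
      by_cases hc : pm.2 ≠ n
      · rw [if_pos hc]
        rw [PySem.Dict.getD_modify]
        by_cases hq : q = pm.1
        · rw [if_pos hq, if_pos ⟨hq.symm, hc⟩, hq]; ring
        · rw [if_neg hq, if_neg (fun h => hq h.1.symm)]; ring
      · rw [if_neg hc, if_neg (fun h => hc h.2)]; ring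
  have hstud : ∀ st : Int × List (Int × List Int),
      (((PySem.Dict.counter (st.2.map (fun e => e.1))).items.map (fun pm =>
          if pm.1 = q ∧ pm.2 ≠ (st.2.length : Int) then 2 * pm.2 * ((st.2.length : Int) - pm.2) else 0)).sum)
        = pvContrib (st.2.map (fun e => e.1)) q := by
    intro st
    rw [PySem.Dict.items_counter, List.map_map]
    have hpt : ∀ k ∈ PySem.Set.ofList (st.2.map (fun e => e.1)),
        ((fun pm : Int × Int => if pm.1 = q ∧ pm.2 ≠ (st.2.length : Int)
            then 2 * pm.2 * ((st.2.length : Int) - pm.2) else 0)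
          ∘ (fun k => (k, ((st.2.map (fun e => e.1)).count k : Int)))) k
          = if k = q then (if ((st.2.map (fun e => e.1)).count k : Int) ≠ (st.2.length : Int)
              then 2 * ((st.2.map (fun e => e.1)).count k : Int)
                * ((st.2.length : Int) - ((st.2.map (fun e => e.1)).count k : Int)) else 0) else 0 := by
      intro k _
      by_cases hk : k = q
      · by_cases hc : ((st.2.map (fun e => e.1)).count k : Int) ≠ (st.2.length : Int)
        · rw [if_pos hk]; rw [if_pos hc]; exact if_pos ⟨hk, hc⟩
        · rw [if_pos hk, if_neg hc]; exact if_neg (fun h => hc h.2)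
      · rw [if_neg hk]; exact if_neg (fun h => hk h.1)
    rw [List.map_congr_left hpt, pv_sum_ite_eq]
    by_cases hmem : q ∈ st.2.map (fun e => e.1)
    · rw [List.count_eq_one_of_mem (PySem.Set.nodup_ofList _) ((PySem.Set.mem_ofList _ _).mpr hmem)]
      by_cases hc : ((st.2.map (fun e => e.1)).count q : Int) ≠ (st.2.length : Int)
      · rw [if_pos hc, pvContrib, List.length_map]; ring
      · rw [if_neg hc, pvContrib, List.length_map]
        rw [not_not.mp hc]
        ring
    · have h0 : (PySem.Set.ofList (st.2.map (fun e => e.1))).count q = 0 := by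
        rw [List.count_eq_zero]
        intro hin
        exact hmem ((PySem.Set.mem_ofList _ _).mp hin)
      have h1 : (st.2.map (fun e => e.1)).count q = 0 := List.count_eq_zero.mpr hmem
      rw [h0, pvContrib, h1]
      push_cast
      ring
  have hmain : ∀ (sa' : List (Int × List (Int × List Int))) (rw : PySem.Dict Int Int),
      ((sa'.foldl (fun rw st =>
          (PySem.Dict.counter (st.2.map (fun e => e.1))).items.foldl (fun rw pm =>
            if pm.2 ≠ (st.2.length : Int) then rw.modify pm.1 0 (· + 2 * pm.2 * ((st.2.length : Int) - pm.2)) else rw) rw) rw).getD q 0)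
        = rw.getD q 0 + (sa'.map (fun st => pvContrib (st.2.map (fun e => e.1)) q)).sum := by
    intro sa'
    induction sa' with
    | nil => intro rw; simp
    | cons st sa' ih =>
      intro rw
      rw [List.foldl_cons, ih, hinner, hstud, List.map_cons, List.sum_cons]
      ring
  rw [pvRW, hmain, PySem.Dict.getD_empty]
  ring

lemma pv_rw_nodup (sa : List (Int × List (Int × List Int))) : (pvRW sa).keys.Nodup := by
  have hinner : ∀ (n : Int) (L : List (Int × Int)) (rw : PySem.Dict Int Int), rw.keys.Nodup →
      ((L.foldl (fun rw pm => if pm.2 ≠ n then rw.modify pm.1 0 (· + 2 * pm.2 * (n - pm.2)) else rw) rw).keys.Nodup) := by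
    intro n L
    induction L with
    | nil => intro rw h; exact h
    | cons pm L ih =>
      intro rw h
      rw [List.foldl_cons]
      apply ih
      by_cases hc : pm.2 ≠ n
      · rw [if_pos hc, PySem.Dict.keys_modify]
        have := PySem.Dict.nodup_keys_insert rw pm.1 ((rw.getD pm.1 0) + 2 * pm.2 * (n - pm.2)) h
        simpa using this
      · rw [if_neg hc]; exact h
  have hmain : ∀ (sa' : List (Int × List (Int × List Int))) (rw : PySem.Dict Int Int), rw.keys.Nodup →
      ((sa'.foldl (fun rw st =>
          (PySem.Dict.counter (st.2.map (fun e => e.1))).items.foldl (fun rw pm =>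
            if pm.2 ≠ (st.2.length : Int) then rw.modify pm.1 0 (· + 2 * pm.2 * ((st.2.length : Int) - pm.2)) else rw) rw) rw).keys.Nodup) := by
    intro sa'
    induction sa' with
    | nil => intro rw h; exact h
    | cons st sa' ih =>
      intro rw h
      rw [List.foldl_cons]
      exact ih _ (hinner _ _ _ h)
  rw [pvRW]
  exact hmain sa _ (by simp)

-- cell value of port B
lemma pv_cellB (cp : List Int) (sa : List (Int × List (Int × List Int))) (ds : List (String × String × Int × Int)) :
    pvShape cp.length ds.length (detect_scheduling_conflicts_alt cp sa ds) ∧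
      ∀ a b : Nat, a < cp.length → b < ds.length →
        pvCell (detect_scheduling_conflicts_alt cp sa ds) a b
          = ((pvRW sa).getD (a : Int) 0 + (pvRW sa).getD ((a : Int) - cp.length) 0) * pvGB ds b := by
  have hB : detect_scheduling_conflicts_alt cp sa ds
      = (pvRW sa).items.foldl (fun M pw => (List.range ds.length).foldl (fun M (s : Nat) =>
          pyAdd2 M pw.1 (s : Int) (pw.2 * ((ds.map (fun s' =>
            (PySem.Dict.counter (ds.map (fun x => x.1))).getD s'.1 0)).getD s 0))) M)
        ((List.range cp.length).map (fun _ => List.replicate ds.length (0 : Int))) := rfl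
  have hsc : pvShape cp.length ds.length ((List.range cp.length).map (fun _ => List.replicate ds.length (0 : Int))) := by
    constructor
    · simp
    · intro r hr
      obtain ⟨x, _, rfl⟩ := List.mem_map.mp hr
      simp
  have hcell0 : ∀ a b, pvCell ((List.range cp.length).map (fun _ => List.replicate ds.length (0 : Int))) a b = 0 := by
    intro a b
    simp only [pvCell, List.getD_eq_getElem?_getD, List.getElem?_map]
    by_cases ha : a < cp.length
    · simp [ha, List.getElem?_replicate]
      split_ifs <;> simp
    · simp [List.getElem?_range, ha]
  have hfold := pv_foldl_cell (P := cp.length) (S := ds.length)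
    (fun M pw => (List.range ds.length).foldl (fun M (s : Nat) =>
        pyAdd2 M pw.1 (s : Int) (pw.2 * ((ds.map (fun s' =>
          (PySem.Dict.counter (ds.map (fun x => x.1))).getD s'.1 0)).getD s 0))) M)
    (fun pw a b => ((List.range ds.length).map (fun (s : Nat) => pvHit cp.length pw.1 a * pvHit ds.length (s : Int) b
      * (pw.2 * ((ds.map (fun s' => (PySem.Dict.counter (ds.map (fun x => x.1))).getD s'.1 0)).getD s 0)))).sum)
    (fun M pw hM => by
      have h := pv_foldl_cell (P := cp.length) (S := ds.length)
        (fun M (s : Nat) => pyAdd2 M pw.1 (s : Int) (pw.2 * ((ds.map (fun s' =>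
          (PySem.Dict.counter (ds.map (fun x => x.1))).getD s'.1 0)).getD s 0)))
        (fun (s : Nat) a b => pvHit cp.length pw.1 a * pvHit ds.length (s : Int) b
          * (pw.2 * ((ds.map (fun s' => (PySem.Dict.counter (ds.map (fun x => x.1))).getD s'.1 0)).getD s 0)))
        (fun M s hM' => pyAdd2_char M pw.1 (s : Int) _ hM')
        (List.range ds.length) M hM
      exact h)
    (pvRW sa).items _ hsc
  rw [hB]
  obtain ⟨hshape, hcells⟩ := hfold
  refine ⟨hshape, fun a b ha hb => ?_⟩
  rw [hcells a b, hcell0, zero_add]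
  -- the slot-weight list evaluated at b is pvGB
  have hw : ((ds.map (fun s' => (PySem.Dict.counter (ds.map (fun x => x.1))).getD s'.1 0)).getD b 0)
      = pvGB ds b := by
    rw [List.getD_eq_getElem?_getD, List.getElem?_map, List.getElem?_eq_getElem hb]
    simp only [Option.map_some, Option.getD_some, PySem.Dict.getD_counter]
    rw [pvGB, if_pos hb]
    congr 2
    rw [List.getD_eq_getElem?_getD, List.getElem?_eq_getElem hb, Option.getD_some]
  -- collapse the inner range sum
  have hrange : ∀ pw : Int × Int, ((List.range ds.length).map (fun (s : Nat) => pvHit cp.length pw.1 a * pvHit ds.length (s : Int) b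
      * (pw.2 * ((ds.map (fun s' => (PySem.Dict.counter (ds.map (fun x => x.1))).getD s'.1 0)).getD s 0)))).sum
        = pvHit cp.length pw.1 a * (pw.2 * pvGB ds b) := by
    intro pw
    have hpt : ∀ s ∈ List.range ds.length, pvHit cp.length pw.1 a * pvHit ds.length (s : Int) b
        * (pw.2 * ((ds.map (fun s' => (PySem.Dict.counter (ds.map (fun x => x.1))).getD s'.1 0)).getD s 0))
          = if s = b then pvHit cp.length pw.1 a
              * (pw.2 * ((ds.map (fun s' => (PySem.Dict.counter (ds.map (fun x => x.1))).getD s'.1 0)).getD s 0)) else 0 := by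
      intro s hs
      have hsS := List.mem_range.mp hs
      have hh : pvHit ds.length (s : Int) b = if s = b then 1 else 0 := by
        simp only [pvHit, pvNorm]
        split_ifs <;> omega
      rw [hh]
      by_cases hsb : s = b <;> simp [hsb] <;> ring
    rw [List.map_congr_left hpt, pv_sum_ite_eq_nat,
      List.count_eq_one_of_mem List.nodup_range (List.mem_range.mpr hb), hw]
    push_cast
    ring
  rw [PySem.Dict.items_eq_map_keys _ (pv_rw_nodup sa) 0, List.map_map]
  have hcomp : ∀ k ∈ (pvRW sa).keys,
      ((fun pw : Int × Int => ((List.range ds.length).map (fun (s : Nat) => pvHit cp.length pw.1 a * pvHit ds.length (s : Int) b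
          * (pw.2 * ((ds.map (fun s' => (PySem.Dict.counter (ds.map (fun x => x.1))).getD s'.1 0)).getD s 0)))).sum)
        ∘ (fun k => (k, (pvRW sa).getD k 0))) k
        = (if k = (a : Int) then (pvRW sa).getD (a : Int) 0 * pvGB ds b else 0)
          + (if k = (a : Int) - cp.length then (pvRW sa).getD ((a : Int) - cp.length) 0 * pvGB ds b else 0) := by
    intro k _
    have h1 : ((fun pw : Int × Int => ((List.range ds.length).map (fun (s : Nat) => pvHit cp.length pw.1 a * pvHit ds.length (s : Int) b
        * (pw.2 * ((ds.map (fun s' => (PySem.Dict.counter (ds.map (fun x => x.1))).getD s'.1 0)).getD s 0)))).sum)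
        ∘ (fun k => (k, (pvRW sa).getD k 0))) k
        = pvHit cp.length k a * ((pvRW sa).getD k 0 * pvGB ds b) := hrange (k, (pvRW sa).getD k 0)
    rw [h1, pvHit_eq_of_lt ha]
    by_cases hk1 : k = (a : Int)
    · rw [if_pos (Or.inl hk1), if_pos hk1, if_neg (by omega), hk1]; ring
    · by_cases hk2 : k = (a : Int) - cp.length
      · rw [if_pos (Or.inr hk2), if_neg hk1, if_pos hk2, hk2]; ring
      · rw [if_neg (by tauto), if_neg hk1, if_neg hk2]; ring
  rw [List.map_congr_left hcomp, List.sum_map_add, pv_sum_ite_eq, pv_sum_ite_eq]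
  have hterm : ∀ t : Int, ((pvRW sa).keys.count t : Int) * ((pvRW sa).getD t 0 * pvGB ds b)
      = (pvRW sa).getD t 0 * pvGB ds b := by
    intro t
    by_cases hm : t ∈ (pvRW sa).keys
    · rw [List.count_eq_one_of_mem (pv_rw_nodup sa) hm]; ring
    · have hc0 : (pvRW sa).getD t 0 = 0 := by
        apply PySem.Dict.getD_of_not_contains
        rcases Bool.eq_false_or_eq_true ((pvRW sa).contains t) with hb' | hb'
        · exact absurd ((PySem.Dict.contains_iff_mem_keys _ _).mp hb') hm
        · exact hb'
      rw [List.count_eq_zero.mpr hm, hc0]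
      push_cast
      ring
  rw [hterm, hterm]
  ring

-- the per-student identity
lemma pv_student (P a : Nat) (ha : a < P) (xs : List Int) :
    2 * ((xs.map (fun y => pvHit P y a * ((xs.length : Int) - (xs.count y : Int)))).sum)
      = pvContrib xs (a : Int) + pvContrib xs ((a : Int) - P) := by
  have hne : (a : Int) ≠ (a : Int) - P := by omega
  have hpt : ∀ y ∈ xs, pvHit P y a * ((xs.length : Int) - (xs.count y : Int))
      = (if y = (a : Int) then ((xs.length : Int) - (xs.count y : Int)) else 0)
        + (if y = (a : Int) - P then ((xs.length : Int) - (xs.count y : Int)) else 0) := by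
    intro y _
    rw [pvHit_eq_of_lt ha]
    by_cases h1 : y = (a : Int) <;> by_cases h2 : y = (a : Int) - P <;> simp [h1, h2] <;> omega
  rw [List.map_congr_left hpt, List.sum_map_add, pv_sum_ite_eq, pv_sum_ite_eq]
  simp only [pvContrib]
  ring

-- two matrices of the same shape with the same cells are equal
lemma pv_ext {P S : Nat} (M N : List (List Int)) (hM : pvShape P S M) (hN : pvShape P S N)
    (h : ∀ a b, a < P → b < S → pvCell M a b = pvCell N a b) : M = N := by
  apply List.ext_getElem (by rw [hM.1, hN.1])
  intro i h1 h2
  apply List.ext_getElem (by rw [hM.2 _ (List.getElem_mem h1), hN.2 _ (List.getElem_mem h2)])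
  intro j hj1 hj2
  have hiP : i < P := by rw [← hM.1]; exact h1
  have hjS : j < S := by rw [← hM.2 _ (List.getElem_mem h1)]; exact hj1
  have hc := h i j hiP hjS
  simpa [pvCell, List.getD_eq_getElem?_getD, List.getElem?_eq_getElem, h1, h2, hj1, hj2] using hc

-- ===== VERDICT (by name: the statement is the Claim_ definition above) =====
theorem detect_scheduling_conflicts_spec : Claim_equal_detect_scheduling_conflicts := by
  intro cp sa ds _hdom _hpre
  unfold Spec_detect_scheduling_conflicts
  obtain ⟨hAs, hAc⟩ := pv_cellA cp sa ds
  obtain ⟨hBs, hBc⟩ := pv_cellB cp sa ds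
  refine pv_ext _ _ hAs hBs ?_
  intro a b ha hb
  rw [hAc a b, hBc a b ha hb]
  have : ∀ st ∈ sa, (2 : Int) * (((st.2.map (fun e : Int × List Int => e.1)).map (fun y =>
      pvHit cp.length y a * (((st.2.map (fun e : Int × List Int => e.1)).length : Int) - ((st.2.map (fun e : Int × List Int => e.1)).count y : Int)))).sum)
      = pvContrib (st.2.map (fun e => e.1)) (a : Int) + pvContrib (st.2.map (fun e => e.1)) ((a : Int) - cp.length) := by
    intro st _
    exact pv_student cp.length a ha _
  rw [List.map_congr_left this, pv_rw_getD, pv_rw_getD, ← List.sum_map_add]
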